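-- pv_equiv track=rewrite | github.com/thatvacationtravel/thatvacation- | reservas/views.py | categorizar_cabinas_pro
-- ===== SOURCE A (Python) =====
-- def categorizar_cabinas_pro(category_list):
--     categorias = {
--         'Inside': [],
--         'Ocean View': [],
--         'Balcon': [],
--         'Suite': [],
--         'Yacht Club': []
--     }
--
--     category_mapping = {
--         'I': 'Inside',
--         'B': 'Balcon',
--         'O': 'Ocean View',
--         'S': 'Suite',
--         'Y': 'Yacht Club'
--     }
--
--     for index, category_code in enumerate(category_list):
--         cabin_info = {'number': f"Cabin-{index + 1}", 'category_code': category_code}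
--         first_letter = category_code[0] if category_code else ''
--
--         if first_letter in category_mapping:
--             mapped_category = category_mapping[first_letter]
--             categorias[mapped_category].append(cabin_info)
--
--     categorias = {cat: cabins for cat, cabins in categorias.items() if cabins}
--     return categorias
-- ===== SOURCE B (Python) =====
-- def categorizar_cabinas_pro(category_list):
--     result = {}
--     for letter, name in [('I', 'Inside'), ('O', 'Ocean View'), ('B', 'Balcon'),
--                          ('S', 'Suite'), ('Y', 'Yacht Club')]:
--         cabins = [{'number': f"Cabin-{index + 1}", 'category_code': code}
--                   for index, code in enumerate(category_list)
--                   if (code[0] if code else '') == letter]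
--         if cabins:
--             result[name] = cabins
--     return result
-- ===== Notes on version B (the rewrite author's own statement) =====
-- stated objective: alternative
-- what changed: Replaces the single pass that appends into a pre-built five-key bucket dict (then drops empty buckets) by an outer loop over the five categories in their fixed order with an inner scan of enumerate(category_list) collecting the matching cabins, adding a key only when its list is non-empty.
import Mathlib
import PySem

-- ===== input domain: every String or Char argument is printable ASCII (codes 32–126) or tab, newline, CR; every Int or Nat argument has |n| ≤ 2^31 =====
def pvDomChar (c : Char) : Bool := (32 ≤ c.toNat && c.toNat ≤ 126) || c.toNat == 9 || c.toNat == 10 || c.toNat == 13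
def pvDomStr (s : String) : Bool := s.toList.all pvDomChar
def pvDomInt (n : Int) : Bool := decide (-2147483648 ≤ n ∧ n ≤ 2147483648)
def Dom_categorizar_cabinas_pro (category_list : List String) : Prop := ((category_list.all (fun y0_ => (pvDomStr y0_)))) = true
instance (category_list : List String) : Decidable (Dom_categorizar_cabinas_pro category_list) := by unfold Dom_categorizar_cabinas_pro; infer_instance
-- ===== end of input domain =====

-- B groups the cabins by an outer loop over the five categories in their fixed order with an
-- inner scan of the enumerated code list (alternative decomposition; same asymptotic cost).

-- ===== PORT A =====
-- category_mapping
def pvMapA : PySem.Dict String String :=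
  PySem.Dict.ofList [("I", "Inside"), ("B", "Balcon"), ("O", "Ocean View"), ("S", "Suite"), ("Y", "Yacht Club")]

-- initial categorias dict (five empty buckets, fixed order)
def pvCat0 : PySem.Dict String (List (List (String × String))) :=
  PySem.Dict.ofList [("Inside", []), ("Ocean View", []), ("Balcon", []), ("Suite", []), ("Yacht Club", [])]

-- cabin_info = {'number': f"Cabin-{index+1}", 'category_code': category_code}
def pvCabinA (q : Int × String) : List (String × String) :=
  [("number", "Cabin-" ++ PySem.Int.toStr (q.1 + 1)), ("category_code", q.2)]

-- first_letter = category_code[0] if category_code else ''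
def pvFirstA (s : String) : String :=
  match s.toList with
  | [] => ""
  | c :: _ => String.mk [c]

-- loop body: if first_letter in category_mapping: categorias[mapped].append(cabin_info)
def pvStepA (d : PySem.Dict String (List (List (String × String)))) (q : Int × String) :
    PySem.Dict String (List (List (String × String))) :=
  match pvMapA.get? (pvFirstA q.2) with
  | some mapped => d.modify mapped [] (fun cs => cs ++ [pvCabinA q])
  | none => d

def categorizar_cabinas_pro (category_list : List String) : List (String × List (List (String × String))) :=
  (((PySem.List.enumerate category_list 0).foldl pvStepA pvCat0).items).filter (fun p => !p.2.isEmpty)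

-- ===== PORT B =====
-- (code[0] if code else '')
def pvFirstB (s : String) : String :=
  match s.toList with
  | [] => ""
  | c :: _ => String.mk [c]

-- inner list comprehension over enumerate(category_list) for one letter
def pvCabinsFor (category_list : List String) (letter : String) : List (List (String × String)) :=
  ((PySem.List.enumerate category_list 0).filter (fun q => pvFirstB q.2 == letter)).map
    (fun q => [("number", "Cabin-" ++ PySem.Int.toStr (q.1 + 1)), ("category_code", q.2)])

def categorizar_cabinas_pro_alt (category_list : List String) : List (String × List (List (String × String))) :=
  [("I", "Inside"), ("O", "Ocean View"), ("B", "Balcon"), ("S", "Suite"), ("Y", "Yacht Club")].foldl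
    (fun acc p =>
      let cabins := pvCabinsFor category_list p.1
      if cabins.isEmpty then acc else acc ++ [(p.2, cabins)]) []

-- ===== PRECONDITION & SPEC =====
def Spec_categorizar_cabinas_pro (category_list : List String) (out : List (String × List (List (String × String)))) : Prop := out = categorizar_cabinas_pro_alt category_list
instance (category_list : List String) (out : List (String × List (List (String × String)))) : Decidable (Spec_categorizar_cabinas_pro category_list out) := by unfold Spec_categorizar_cabinas_pro; infer_instance

-- ===== CLAIM (what is proved, stated in full; the proofs are below) =====
def Claim_equal_categorizar_cabinas_pro : Prop := ∀ (category_list : List String), Dom_categorizar_cabinas_pro category_list → Spec_categorizar_cabinas_pro category_list (categorizar_cabinas_pro category_list)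

-- ===== LEMMAS AND PROOFS =====

lemma mapA_get_char (f : String) :
    pvMapA.get? f =
      if f = "Y" then some "Yacht Club" else if f = "S" then some "Suite"
      else if f = "O" then some "Ocean View" else if f = "B" then some "Balcon"
      else if f = "I" then some "Inside" else none := by
  simp [pvMapA, PySem.Dict.ofList, PySem.Dict.update, PySem.Dict.get?_insert, PySem.Dict.get?_empty]

lemma mapA_mem {f m : String} (h : pvMapA.get? f = some m) :
    m ∈ (["Inside", "Ocean View", "Balcon", "Suite", "Yacht Club"] : List String) := by
  rw [mapA_get_char] at h
  split_ifs at h <;> simp_all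

lemma predI (f : String) : (pvMapA.get? f == some "Inside") = (f == "I") := by
  rw [mapA_get_char]; split_ifs with h1 h2 h3 h4 h5 <;> simp_all
lemma predO (f : String) : (pvMapA.get? f == some "Ocean View") = (f == "O") := by
  rw [mapA_get_char]; split_ifs with h1 h2 h3 h4 h5 <;> simp_all
lemma predB (f : String) : (pvMapA.get? f == some "Balcon") = (f == "B") := by
  rw [mapA_get_char]; split_ifs with h1 h2 h3 h4 h5 <;> simp_all
lemma predS (f : String) : (pvMapA.get? f == some "Suite") = (f == "S") := by
  rw [mapA_get_char]; split_ifs with h1 h2 h3 h4 h5 <;> simp_all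
lemma predY (f : String) : (pvMapA.get? f == some "Yacht Club") = (f == "Y") := by
  rw [mapA_get_char]; split_ifs with h1 h2 h3 h4 h5 <;> simp_all

lemma getD_foldA (xs : List (Int × String)) (d : PySem.Dict String (List (List (String × String)))) (k : String) :
    (xs.foldl pvStepA d).getD k [] =
      d.getD k [] ++ (xs.filter (fun q => pvMapA.get? (pvFirstA q.2) == some k)).map pvCabinA := by
  induction xs generalizing d with
  | nil => simp
  | cons x xs ih =>
    simp only [List.foldl_cons, List.filter_cons]
    rcases h : pvMapA.get? (pvFirstA x.2) with _ | m
    · rw [ih]; simp [pvStepA, h]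
    · by_cases hk : k = m
      · subst hk
        rw [ih]
        simp [pvStepA, h]
      · rw [ih]
        have : (some m == some k) = false := by simp [Ne.symm hk]
        simp [pvStepA, h, PySem.Dict.getD_modify, hk, this]

lemma keys_foldA (xs : List (Int × String)) (d : PySem.Dict String (List (List (String × String))))
    (h : d.keys = ["Inside", "Ocean View", "Balcon", "Suite", "Yacht Club"]) :
    (xs.foldl pvStepA d).keys = ["Inside", "Ocean View", "Balcon", "Suite", "Yacht Club"] := by
  induction xs generalizing d with
  | nil => simpa using h
  | cons x xs ih =>
    simp only [List.foldl_cons]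
    apply ih
    rcases hm : pvMapA.get? (pvFirstA x.2) with _ | m
    · simpa [pvStepA, hm] using h
    · have hmem : m ∈ d.keys := by rw [h]; exact mapA_mem hm
      have hc : d.contains m = true := (PySem.Dict.contains_iff_mem_keys ..).mpr hmem
      simp [pvStepA, hm, PySem.Dict.keys_modify, PySem.Dict.keys_insert_of_contains _ _ hc, h]

-- ===== VERDICT (by name: the statement is the Claim_ definition above) =====
theorem categorizar_cabinas_pro_spec : Claim_equal_categorizar_cabinas_pro := by
  intro l _
  unfold Spec_categorizar_cabinas_pro categorizar_cabinas_pro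
  have hkeys : (((PySem.List.enumerate l 0).foldl pvStepA pvCat0)).keys
      = ["Inside", "Ocean View", "Balcon", "Suite", "Yacht Club"] := by
    apply keys_foldA; decide
  rw [PySem.Dict.items_eq_map_keys _ (by rw [hkeys]; decide) []]
  rw [hkeys]
  simp only [List.map_cons, List.map_nil, getD_foldA,
    show pvCat0.getD "Inside" [] = [] from by decide,
    show pvCat0.getD "Ocean View" [] = [] from by decide,
    show pvCat0.getD "Balcon" [] = [] from by decide,
    show pvCat0.getD "Suite" [] = [] from by decide,
    show pvCat0.getD "Yacht Club" [] = [] from by decide,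
    List.nil_append]
  simp only [predI, predO, predB, predS, predY]
  simp only [categorizar_cabinas_pro_alt, pvCabinsFor, List.foldl_cons, List.foldl_nil]
  have hfb : pvFirstB = pvFirstA := rfl
  have hcb : (fun q : Int × String => [("number", "Cabin-" ++ PySem.Int.toStr (q.1 + 1)), ("category_code", q.2)]) = pvCabinA := rfl
  rw [hfb, hcb]
  set cI := ((PySem.List.enumerate l 0).filter (fun q => pvFirstA q.2 == "I")).map pvCabinA with hI
  set cO := ((PySem.List.enumerate l 0).filter (fun q => pvFirstA q.2 == "O")).map pvCabinA with hO
  set cB := ((PySem.List.enumerate l 0).filter (fun q => pvFirstA q.2 == "B")).map pvCabinA with hB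
  set cS := ((PySem.List.enumerate l 0).filter (fun q => pvFirstA q.2 == "S")).map pvCabinA with hS
  set cY := ((PySem.List.enumerate l 0).filter (fun q => pvFirstA q.2 == "Y")).map pvCabinA with hY
  by_cases e1 : cI.isEmpty <;> by_cases e2 : cO.isEmpty <;> by_cases e3 : cB.isEmpty <;>
    by_cases e4 : cS.isEmpty <;> by_cases e5 : cY.isEmpty <;>
    simp [List.filter, e1, e2, e3, e4, e5]
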